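-- pv_equiv track=rewrite | github.com/apropos13/Bayesian-and-LSTM-Networks-in-NLG | bagel/model.py | __create_mapping_phrases
-- ===== SOURCE A (Python) =====
-- def __create_mapping_phrases(phrase_sequences): #mapping of stacks
--     mapping = dict()
--     mapping_rev = []
--     counter = 0
--
--     for seq in phrase_sequences:
--         for phrase in seq:
--             key = phrase
--             if key not in mapping:
--                 mapping[key] = counter
--                 mapping_rev.append(key)
--                 counter += 1
--
--     return (mapping, mapping_rev)
-- ===== SOURCE B (Python) =====
-- def __create_mapping_phrases(phrase_sequences):
--     flat = [p for seq in phrase_sequences for p in seq]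
--     first = {}
--     for i, p in reversed(list(enumerate(flat))):
--         first[p] = i
--     mapping_rev = sorted(first, key=first.get)
--     mapping = dict(zip(mapping_rev, range(len(mapping_rev))))
--     return (mapping, mapping_rev)
-- ===== Notes on version B (the rewrite author's own statement) =====
-- stated objective: alternative
-- what changed: Replaces A's single fused pass with a seen-dict membership test and manual counter by a sort-based algorithm: a reverse pass over the flattened stream records each phrase's first-occurrence position by overwriting (no membership test), the distinct phrases are then sorted by that position, and the index dict is built once from zip(mapping_rev, range(n)).
import Mathlib
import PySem

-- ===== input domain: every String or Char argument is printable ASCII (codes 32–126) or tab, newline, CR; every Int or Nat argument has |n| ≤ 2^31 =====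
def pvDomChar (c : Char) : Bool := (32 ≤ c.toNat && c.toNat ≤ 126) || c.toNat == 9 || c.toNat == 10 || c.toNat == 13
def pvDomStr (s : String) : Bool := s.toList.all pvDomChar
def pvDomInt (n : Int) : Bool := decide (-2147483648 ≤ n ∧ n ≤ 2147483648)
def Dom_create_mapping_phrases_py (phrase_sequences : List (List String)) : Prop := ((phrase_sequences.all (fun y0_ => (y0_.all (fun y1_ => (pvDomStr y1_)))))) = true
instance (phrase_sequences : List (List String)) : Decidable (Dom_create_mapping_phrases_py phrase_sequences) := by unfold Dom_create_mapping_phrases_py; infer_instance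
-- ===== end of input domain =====

-- B replaces A's fused seen-dict pass by a different algorithm: a reverse pass builds each phrase's first-occurrence position, then the keys are SORTED by that position (objective: alternative; return value only).


-- ===== PORT A =====
def create_mapping_phrases_py (phrase_sequences : List (List String)) : (List (String × Int)) × List String :=
  let st := phrase_sequences.foldl
    (fun st seq => seq.foldl
      (fun (st : PySem.Dict String Int × List String × Int) phrase =>
        if st.1.contains phrase then st
        else (st.1.insert phrase st.2.2, st.2.1 ++ [phrase], st.2.2 + 1))
      st)
    (PySem.Dict.empty, [], 0)
  (st.1.items, st.2.1)

-- ===== PORT B =====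
def create_mapping_phrases_py_alt (phrase_sequences : List (List String)) : (List (String × Int)) × List String :=
  let flat := phrase_sequences.flatMap (fun seq => seq.map (fun p => p))
  let first := ((PySem.List.enumerate flat 0).reverse).foldl
      (fun (d : PySem.Dict String Int) ip => d.insert ip.2 ip.1) PySem.Dict.empty
  let mapping_rev := PySem.List.sorted first.keys (fun k => first.getD k 0) false
  let mapping := (mapping_rev.zip (PySem.List.pyRange 0 (PySem.List.len mapping_rev) 1)).foldl
      (fun (d : PySem.Dict String Int) kv => d.insert kv.1 kv.2) PySem.Dict.empty
  (mapping.items, mapping_rev)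

-- ===== PRECONDITION & SPEC =====
def Spec_create_mapping_phrases_py (phrase_sequences : List (List String)) (out : (List (String × Int)) × List String) : Prop := out = create_mapping_phrases_py_alt phrase_sequences
instance (phrase_sequences : List (List String)) (out : (List (String × Int)) × List String) : Decidable (Spec_create_mapping_phrases_py phrase_sequences out) := by unfold Spec_create_mapping_phrases_py; infer_instance

-- ===== CLAIM (what is proved, stated in full; the proofs are below) =====
def Claim_equal_create_mapping_phrases_py : Prop := ∀ (phrase_sequences : List (List String)), Dom_create_mapping_phrases_py phrase_sequences → Spec_create_mapping_phrases_py phrase_sequences (create_mapping_phrases_py phrase_sequences)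

-- ===== LEMMAS AND PROOFS =====

-- A's loop body and the dictionary that corresponds to a given mapping_rev prefix
def pvStepA (st : PySem.Dict String Int × List String × Int) (phrase : String) :
    PySem.Dict String Int × List String × Int :=
  if st.1.contains phrase then st
  else (st.1.insert phrase st.2.2, st.2.1 ++ [phrase], st.2.2 + 1)

def pvD (rev : List String) : PySem.Dict String Int :=
  PySem.Dict.mk ((PySem.List.enumerate rev 0).map (fun p => (p.2, p.1)))

theorem pvD_keys (rev : List String) : (pvD rev).keys = rev := by
  simp [pvD, PySem.Dict.keys, List.map_map, Function.comp_def, PySem.List.map_snd_enumerate]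

theorem pvD_contains (rev : List String) (x : String) :
    (pvD rev).contains x = decide (x ∈ rev) := by
  rw [PySem.Dict.contains_eq_decide_mem_keys, pvD_keys]

theorem pvStepA_inv (xs : List String) : ∀ rev : List String,
    xs.foldl pvStepA (pvD rev, rev, (rev.length : Int)) =
      (pvD (xs.foldl PySem.Set.add rev), xs.foldl PySem.Set.add rev,
        ((xs.foldl PySem.Set.add rev).length : Int)) := by
  induction xs with
  | nil => intro rev; simp
  | cons x xs ih =>
    intro rev
    by_cases hx : x ∈ rev
    · have h1 : pvStepA (pvD rev, rev, (rev.length : Int)) x = (pvD rev, rev, (rev.length : Int)) := by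
        simp [pvStepA, pvD_contains, hx]
      have h2 : PySem.Set.add rev x = rev := by simp [PySem.Set.add, hx]
      simp only [List.foldl_cons, h1, h2, ih rev]
    · have hc : (pvD rev).contains x = false := by simp [pvD_contains, hx]
      have hins : (pvD rev).insert x (rev.length : Int) = pvD (rev ++ [x]) := by
        apply PySem.Dict.ext
        rw [PySem.Dict.items_insert, hc]
        simp [pvD, PySem.List.enumerate_append]
      have h1 : pvStepA (pvD rev, rev, (rev.length : Int)) x =
          (pvD (rev ++ [x]), rev ++ [x], ((rev ++ [x]).length : Int)) := by
        simp [pvStepA, hc, hins]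
      have h2 : PySem.Set.add rev x = rev ++ [x] := by simp [PySem.Set.add, hx]
      simp only [List.foldl_cons, h1, h2, ih (rev ++ [x])]

theorem pv_nested_foldl (ps : List (List String)) :
    ∀ st, ps.foldl (fun st seq => seq.foldl pvStepA st) st =
      (ps.flatMap (fun seq => seq)).foldl pvStepA st := by
  induction ps with
  | nil => intro st; rfl
  | cons s ps ih => intro st; simp [List.foldl_append, ih]

-- filtering out an element already in the accumulator does not change Set.add folding
theorem pv_fold_add_filter (x : String) (xs : List String) : ∀ acc : List String, x ∈ acc →
    xs.foldl PySem.Set.add acc = (xs.filter (fun y => !(y == x))).foldl PySem.Set.add acc := by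
  induction xs with
  | nil => intro acc _; rfl
  | cons y ys ih =>
    intro acc hx
    by_cases hy : y = x
    · subst hy
      have : PySem.Set.add acc y = acc := by simp [PySem.Set.add, hx]
      simp [this, ih acc hx]
    · have hx' : x ∈ PySem.Set.add acc y := by
        simp [PySem.Set.add]; split <;> simp [hx]
      simp [hy, ih _ hx']

-- an element absent from the stream can be pulled out of the accumulator
theorem pv_fold_add_cons (x : String) (xs : List String) : ∀ acc : List String, x ∉ xs →
    xs.foldl PySem.Set.add (x :: acc) = x :: xs.foldl PySem.Set.add acc := by
  induction xs with
  | nil => intro acc _; rfl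
  | cons y ys ih =>
    intro acc hx
    have hyx : ¬ (y = x) := fun h => hx (h ▸ List.mem_cons_self)
    have hadd : PySem.Set.add (x :: acc) y = x :: PySem.Set.add acc y := by
      simp [PySem.Set.add, PySem.Set.contains, hyx]
      split <;> simp
    have hx' : x ∉ ys := fun h => hx (List.mem_cons_of_mem _ h)
    simp [hadd, ih _ hx']

theorem pv_ofList_cons_filter (x : String) (xs : List String) :
    PySem.Set.ofList (x :: xs) = x :: PySem.Set.ofList (xs.filter (fun y => !(y == x))) := by
  have h1 : PySem.Set.ofList (x :: xs) = xs.foldl PySem.Set.add [x] := by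
    simp [PySem.Set.ofList_eq_foldl, PySem.Set.add, PySem.Set.contains]
  have h2 : xs.foldl PySem.Set.add [x] =
      (xs.filter (fun y => !(y == x))).foldl PySem.Set.add [x] :=
    pv_fold_add_filter x xs [x] (by simp)
  have h3 : x ∉ xs.filter (fun y => !(y == x)) := by simp
  have h4 := pv_fold_add_cons x (xs.filter (fun y => !(y == x))) [] h3
  rw [h1, h2]
  simpa [PySem.Set.ofList_eq_foldl] using h4

-- B's reverse loop, folded from the right, with a generalized enumerate start
def pvF (xs : List String) (s : Int) : PySem.Dict String Int :=
  (PySem.List.enumerate xs s).foldr (fun ip d => d.insert ip.2 ip.1) PySem.Dict.empty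

theorem pvF_cons (x : String) (t : List String) (s : Int) :
    pvF (x :: t) s = (pvF t (s + 1)).insert x s := by
  simp [pvF, PySem.List.enumerate_cons]

theorem pvF_get? (xs : List String) : ∀ (s : Int) (y : String),
    (pvF xs s).get? y = if y ∈ xs then some (s + (xs.idxOf y : Int)) else none := by
  induction xs with
  | nil => intro s y; simp [pvF, PySem.List.enumerate_nil, PySem.Dict.get?, PySem.Dict.empty]
  | cons x t ih =>
    intro s y
    rw [pvF_cons, PySem.Dict.get?_insert]
    by_cases hxy : y = x
    · subst hxy; simp [List.idxOf_cons_self]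
    · rw [if_neg hxy, ih (s + 1) y]
      have hidx : (x :: t).idxOf y = t.idxOf y + 1 :=
        List.idxOf_cons_ne t (fun h => hxy h.symm)
      by_cases hmem : y ∈ t
      · simp only [hmem, if_true, List.mem_cons, hxy, false_or, hidx]
        congr 1
        push_cast
        ring
      · simp [hmem, hxy]

theorem pvF_keys_nodup (xs : List String) : ∀ s : Int, (pvF xs s).keys.Nodup := by
  induction xs with
  | nil => intro s; simp [pvF, PySem.List.enumerate_nil, PySem.Dict.keys, PySem.Dict.empty]
  | cons x t ih =>
    intro s
    rw [pvF_cons]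
    exact PySem.Dict.nodup_keys_insert _ _ _ (ih (s + 1))

theorem pvF_mem_keys (xs : List String) (s : Int) (y : String) :
    y ∈ (pvF xs s).keys ↔ y ∈ xs := by
  rw [← not_iff_not, PySem.Dict.get?_eq_none_iff_not_mem_keys (pvF xs s) y |>.symm, pvF_get?]
  by_cases h : y ∈ xs <;> simp [h]

theorem pvF_getD (xs : List String) (s : Int) (y : String) (h : y ∈ xs) :
    (pvF xs s).getD y 0 = s + (xs.idxOf y : Int) := by
  rw [PySem.Dict.getD_eq_get?_getD, pvF_get?, if_pos h]
  rfl

-- first-occurrence positions respect the order of a filtered sublist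
theorem pv_idx_filter_mono (P : String → Bool) (xs : List String) : ∀ a b : String,
    a ∈ xs.filter P → b ∈ xs.filter P →
    (xs.filter P).idxOf a < (xs.filter P).idxOf b → xs.idxOf a < xs.idxOf b := by
  induction xs with
  | nil => intro a b ha _ _; simp at ha
  | cons y t ih =>
    intro a b ha hb h
    by_cases hy : P y = true
    · rw [List.filter_cons_of_pos hy] at ha hb h
      by_cases hay : a = y
      · subst hay
        rw [List.idxOf_cons_self] at h ⊢
        by_cases hby : b = a
        · subst hby
          rw [List.idxOf_cons_self] at h
          omega
        · rw [List.idxOf_cons_ne t (fun hh => hby hh.symm)]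
          omega
      · by_cases hby : b = y
        · subst hby
          rw [List.idxOf_cons_self, List.idxOf_cons_ne _ (fun hh => hay hh.symm)] at h
          omega
        · rw [List.idxOf_cons_ne _ (fun hh => hay hh.symm),
            List.idxOf_cons_ne _ (fun hh => hby hh.symm)] at h ⊢
          have ha' : a ∈ t.filter P := by
            rcases List.mem_cons.mp ha with h' | h'
            · exact absurd h' hay
            · exact h'
          have hb' : b ∈ t.filter P := by
            rcases List.mem_cons.mp hb with h' | h'
            · exact absurd h' hby
            · exact h'
          have := ih a b ha' hb' (by omega)
          omega
    · rw [List.filter_cons_of_neg hy] at ha hb h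
      have hay : a ≠ y := fun hh => hy (hh ▸ (List.mem_filter.mp ha).2)
      have hby : b ≠ y := fun hh => hy (hh ▸ (List.mem_filter.mp hb).2)
      rw [List.idxOf_cons_ne _ (fun hh => hay hh.symm),
        List.idxOf_cons_ne _ (fun hh => hby hh.symm)]
      have := ih a b ha hb h
      omega

-- the dedup order IS the order of first occurrence
theorem pv_ofList_pairwise_idx : ∀ (n : Nat) (xs : List String), xs.length ≤ n →
    (PySem.Set.ofList xs).Pairwise (fun a b => xs.idxOf a < xs.idxOf b) := by
  intro n
  induction n with
  | zero =>
    intro xs hlen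
    have : xs = [] := List.eq_nil_of_length_eq_zero (Nat.le_zero.mp hlen)
    subst this
    simp [PySem.Set.ofList_eq_foldl]
  | succ n ih =>
    intro xs hlen
    cases xs with
    | nil => simp [PySem.Set.ofList_eq_foldl]
    | cons x t =>
      rw [pv_ofList_cons_filter]
      have hflen : (t.filter (fun y => !(y == x))).length ≤ n := by
        have := List.length_filter_le (fun y => !(y == x)) t
        simp at hlen
        omega
      refine List.Pairwise.cons ?_ ?_
      · intro b hb
        have hbf : b ∈ t.filter (fun y => !(y == x)) :=
          (PySem.Set.mem_ofList _ b).mp hb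
        have hbx : b ≠ x := by
          have := (List.mem_filter.mp hbf).2
          simpa using this
        rw [List.idxOf_cons_self, List.idxOf_cons_ne _ (fun hh => hbx hh.symm)]
        omega
      · have hpw := ih (t.filter (fun y => !(y == x))) hflen
        refine List.Pairwise.imp_of_mem ?_ hpw
        intro a b ha hb hab
        have haf : a ∈ t.filter (fun y => !(y == x)) := (PySem.Set.mem_ofList _ a).mp ha
        have hbf : b ∈ t.filter (fun y => !(y == x)) := (PySem.Set.mem_ofList _ b).mp hb
        have hax : a ≠ x := by have := (List.mem_filter.mp haf).2; simpa using this
        have hbx : b ≠ x := by have := (List.mem_filter.mp hbf).2; simpa using this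
        have := pv_idx_filter_mono (fun y => !(y == x)) t a b haf hbf hab
        rw [List.idxOf_cons_ne _ (fun hh => hax hh.symm),
          List.idxOf_cons_ne _ (fun hh => hbx hh.symm)]
        omega

-- inserting pairs with fresh, pairwise-distinct keys appends them to the items list
theorem pv_fold_insert_items (ps : List (String × Int)) : ∀ d : PySem.Dict String Int,
    (ps.map Prod.fst).Nodup → (∀ k ∈ ps.map Prod.fst, k ∉ d.keys) →
    (ps.foldl (fun d kv => d.insert kv.1 kv.2) d).items = d.items ++ ps := by
  induction ps with
  | nil => intro d _ _; simp
  | cons kv ps ih =>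
    intro d hnd hfresh
    have hc : d.contains kv.1 = false := by
      rw [PySem.Dict.contains_eq_decide_mem_keys]
      simp [hfresh kv.1 (by simp)]
    have hitems := PySem.Dict.items_insert_of_not_contains (d := d) (k := kv.1) (v := kv.2) hc
    have hkeys : (d.insert kv.1 kv.2).keys = d.keys ++ [kv.1] := by
      simp [PySem.Dict.keys, hitems]
    have hnd' : (ps.map Prod.fst).Nodup := (List.nodup_cons.mp (by simpa using hnd)).2
    have hfresh' : ∀ k ∈ ps.map Prod.fst, k ∉ (d.insert kv.1 kv.2).keys := by
      intro k hk
      rw [hkeys]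
      simp only [List.mem_append, List.mem_singleton]
      rintro (h | h)
      · exact hfresh k (by simp [hk]) h
      · exact (List.nodup_cons.mp (by simpa using hnd)).1 (h ▸ hk)
    simp only [List.foldl_cons]
    rw [ih _ hnd' hfresh', hitems]
    simp

theorem pv_zip_range_eq_enumerate (rev : List String) : ∀ s : Int,
    rev.zip (PySem.List.pyRange s (s + rev.length) 1) =
      (PySem.List.enumerate rev s).map (fun p => (p.2, p.1)) := by
  induction rev with
  | nil => intro s; simp
  | cons x t ih =>
    intro s
    have hlt : s < s + (x :: t).length := by simp
    rw [PySem.List.pyRange_one_cons hlt]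
    have h2 : s + ((x :: t).length : Int) = (s + 1) + (t.length : Int) := by
      simp only [List.length_cons]; push_cast; ring
    rw [h2]
    simp [PySem.List.enumerate_cons, ih (s + 1)]

-- ===== VERDICT (by name: the statement is the Claim_ definition above) =====
theorem create_mapping_phrases_py_spec : Claim_equal_create_mapping_phrases_py := by
  intro ps _
  show create_mapping_phrases_py ps = create_mapping_phrases_py_alt ps
  have hmap : ∀ seq : List String, seq.map (fun phrase => phrase) = seq := fun seq => List.map_id' _
  unfold create_mapping_phrases_py create_mapping_phrases_py_alt
  simp only [hmap]
  have hbody : (fun (st : PySem.Dict String Int × List String × Int) (phrase : String) =>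
      if st.1.contains phrase then st
      else (st.1.insert phrase st.2.2, st.2.1 ++ [phrase], st.2.2 + 1)) = pvStepA := rfl
  rw [hbody, show ((PySem.Dict.empty : PySem.Dict String Int), ([] : List String), (0 : Int)) =
      (pvD [], [], (([] : List String).length : Int)) from rfl]
  rw [pv_nested_foldl, pvStepA_inv]
  set flat := ps.flatMap (fun seq => seq) with hflat
  have hrev : flat.foldl PySem.Set.add [] = PySem.Set.ofList flat := by
    simp [PySem.Set.ofList_eq_foldl]
  set rev := PySem.Set.ofList flat with hrevdef
  -- B's first dict is pvF flat 0
  have hfirst : ((PySem.List.enumerate flat 0).reverse).foldl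
      (fun (d : PySem.Dict String Int) ip => d.insert ip.2 ip.1) PySem.Dict.empty = pvF flat 0 := by
    rw [List.foldl_reverse]; rfl
  -- sorting the keys by first-occurrence position recovers the dedup order
  have hndrev : rev.Nodup := PySem.Set.nodup_ofList flat
  have hperm : rev.Perm (pvF flat 0).keys := by
    refine (List.perm_ext_iff_of_nodup hndrev (pvF_keys_nodup flat 0)).mpr ?_
    intro a
    rw [pvF_mem_keys, hrevdef, PySem.Set.mem_ofList]
  have hpw : rev.Pairwise (fun a b => (pvF flat 0).getD a 0 < (pvF flat 0).getD b 0) := by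
    refine List.Pairwise.imp_of_mem ?_ (pv_ofList_pairwise_idx flat.length flat le_rfl)
    intro a b ha hb hab
    have ha' : a ∈ flat := (PySem.Set.mem_ofList _ a).mp ha
    have hb' : b ∈ flat := (PySem.Set.mem_ofList _ b).mp hb
    rw [pvF_getD flat 0 a ha', pvF_getD flat 0 b hb']
    omega
  have hsorted : PySem.List.sorted (pvF flat 0).keys (fun k => (pvF flat 0).getD k 0) false = rev :=
    PySem.List.sorted_eq_of_perm_of_pairwise_lt _ _ _ hperm hpw
  -- the zip-built index dict
  have hnd : (rev.zip (PySem.List.pyRange 0 (PySem.List.len rev) 1)).map Prod.fst = rev := by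
    apply List.map_fst_zip
    rw [PySem.List.len_eq, PySem.List.pyRange_zero_natCast]
    simp
  have hzip : rev.zip (PySem.List.pyRange 0 (PySem.List.len rev) 1) =
      (PySem.List.enumerate rev 0).map (fun p => (p.2, p.1)) := by
    have := pv_zip_range_eq_enumerate rev 0
    simpa [PySem.List.len_eq] using this
  have hitems : ((rev.zip (PySem.List.pyRange 0 (PySem.List.len rev) 1)).foldl
      (fun (d : PySem.Dict String Int) kv => d.insert kv.1 kv.2) PySem.Dict.empty).items =
      (PySem.List.enumerate rev 0).map (fun p => (p.2, p.1)) := by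
    rw [pv_fold_insert_items _ PySem.Dict.empty (by rw [hnd]; exact hndrev)
      (by intro k _; simp [PySem.Dict.keys, PySem.Dict.empty])]
    simpa using hzip
  simp only [hrev, hfirst, hsorted, hitems]
  have : (pvD rev).items = (PySem.List.enumerate rev 0).map (fun p => (p.2, p.1)) := rfl
  rw [this]
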